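-- pv_equiv track=rewrite | github.com/riscv/riscv-arch-test | generators/testgen/src/testgen/io/templates.py | generate_march_string
-- ===== SOURCE A (Python) =====
-- _EXTENSION_CANONICAL_ORDER = "iemafdqlcbkjtpvh"
--
-- def _single_letter_sort_key(ext: str) -> int:
--     """Return the canonical sort position for a single-letter extension."""
--     ext = ext.lower()
--     if ext in _EXTENSION_CANONICAL_ORDER:
--         return _EXTENSION_CANONICAL_ORDER.index(ext)
--     return len(_EXTENSION_CANONICAL_ORDER)
--
-- def _multi_letter_sort_key(ext: str) -> tuple[int, int, str]:
--     """Return sort key for multi-letter extensions in canonical order.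
--
--     Sort order: Z extensions first, then S extensions, then others.
--     Z extensions are sub-sorted by their second letter in canonical
--     single-letter order (e.g. Zi* < Zm* < Za* < Zf* < Zb* < Zv*),
--     then alphabetically within the same sub-group.
--     """
--     ext = ext.lower()
--     if ext.startswith("z"):
--         group = 0
--         # Sub-group by second letter in canonical single-letter order
--         second_letter = ext[1] if len(ext) > 1 else ""
--         subgroup = (
--             _EXTENSION_CANONICAL_ORDER.index(second_letter)
--             if second_letter in _EXTENSION_CANONICAL_ORDER
--             else len(_EXTENSION_CANONICAL_ORDER)
--         )
--     elif ext.startswith("s"):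
--         group = 1
--         subgroup = 0
--     else:
--         group = 2
--         subgroup = 0
--     return (group, subgroup, ext)
--
-- def generate_march_string(ext_components: list[str], xlen: int) -> str:
--     """Generate march string from extension components."""
--     # Separate single-letter and multi-letter extensions
--     single_letter: list[str] = []
--     multi_letter: list[str] = []
--     for ext in ext_components:
--         if ext in ["Sm", "S", "U"]:
--             continue  # Skip privilege modes in march string
--         if len(ext) == 1:
--             single_letter.append(ext)
--         else:
--             multi_letter.append(ext)
--
--     # Sort single-letter extensions in canonical order (I/E, M, A, F, D, Q, C, B, V, H)
--     single_letter.sort(key=_single_letter_sort_key)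
--     # Sort multi-letter extensions in canonical order (Z by subgroup then alpha, S alpha, others alpha)
--     multi_letter.sort(key=_multi_letter_sort_key)
--
--     # Construct march string: single-letter extensions first (no separator), then multi-letter (underscore separated)
--     ext_str = "".join(single_letter)
--     if multi_letter:
--         ext_str += "_" + "_".join(multi_letter)
--     ext_str = ext_str.lower()
--     march = f"rv{xlen if xlen != 0 else '${XLEN}'}{ext_str}"
--
--     return march
-- ===== SOURCE B (Python) =====
-- _EXTENSION_CANONICAL_ORDER = "iemafdqlcbkjtpvh"
--
-- def _z_subpos(ext):
--     """For a lowercased z-extension, its canonical second-letter position; None otherwise."""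
--     le = ext.lower()
--     if not le.startswith("z"):
--         return None
--     second = le[1] if len(le) > 1 else ""
--     if second in _EXTENSION_CANONICAL_ORDER:
--         return _EXTENSION_CANONICAL_ORDER.index(second)
--     return len(_EXTENSION_CANONICAL_ORDER)
--
-- def generate_march_string(ext_components: list, xlen: int) -> str:
--     """Generate march string from extension components (bucket ordering over the fixed canonical alphabet)."""
--     single = []
--     multi = []
--     for ext in ext_components:
--         if ext in ["Sm", "S", "U"]:
--             continue  # Skip privilege modes in march string
--         if len(ext) == 1:
--             single.append(ext)
--         else:
--             multi.append(ext)
--     # Single letters: one bucket pass over the canonical alphabet (a counting sort);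
--     # letters outside the alphabet keep their input order at the end.
--     ordered_single = []
--     for c in _EXTENSION_CANONICAL_ORDER:
--         ordered_single += [e for e in single if e.lower() == c]
--     ordered_single += [e for e in single if e.lower() not in _EXTENSION_CANONICAL_ORDER]
--     # Multi letters: z-buckets keyed by second-letter canonical position, then s, then
--     # the rest; only each small bucket is sorted, alphabetically by lowercase.
--     ordered_multi = []
--     for i in range(len(_EXTENSION_CANONICAL_ORDER) + 1):
--         ordered_multi += sorted([e for e in multi if _z_subpos(e) == i], key=str.lower)
--     ordered_multi += sorted([e for e in multi if _z_subpos(e) is None and e.lower().startswith("s")], key=str.lower)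
--     ordered_multi += sorted([e for e in multi if _z_subpos(e) is None and not e.lower().startswith("s")], key=str.lower)
--     ext_str = "".join(ordered_single)
--     if ordered_multi:
--         ext_str = ext_str + "_" + "_".join(ordered_multi)
--     ext_str = ext_str.lower()
--     return f"rv{xlen if xlen != 0 else '${XLEN}'}{ext_str}"
-- ===== Notes on version B (the rewrite author's own statement) =====
-- stated objective: alternative
-- what changed: Replaces both comparison sorts by key-driven bucketing: single letters are ordered by one pass over the fixed canonical alphabet (a counting sort with unknown letters kept in input order at the end), and multi-letter extensions are distributed into z-buckets keyed by second-letter canonical position, then s, then others, sorting only each small bucket alphabetically by lowercase.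
import Mathlib
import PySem

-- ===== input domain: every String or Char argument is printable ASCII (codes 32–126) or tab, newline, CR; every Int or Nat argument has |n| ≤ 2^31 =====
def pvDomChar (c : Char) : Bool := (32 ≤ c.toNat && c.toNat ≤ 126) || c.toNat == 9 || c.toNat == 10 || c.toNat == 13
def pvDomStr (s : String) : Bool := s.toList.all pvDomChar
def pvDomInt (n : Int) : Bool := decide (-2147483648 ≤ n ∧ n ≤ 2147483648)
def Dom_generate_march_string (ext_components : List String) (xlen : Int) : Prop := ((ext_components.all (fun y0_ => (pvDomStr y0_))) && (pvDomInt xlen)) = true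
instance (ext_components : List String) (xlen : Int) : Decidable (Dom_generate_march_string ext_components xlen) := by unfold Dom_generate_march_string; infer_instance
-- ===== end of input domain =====

-- B replaces the two comparison sorts by one bucket pass over the fixed canonical alphabet
-- (single letters) and by three filter buckets — z (sub-bucketed by second-letter position),
-- s, other — each sorted only alphabetically (objective: alternative decomposition).

-- ===== PORT A =====
-- _EXTENSION_CANONICAL_ORDER = "iemafdqlcbkjtpvh", as its list of characters
-- (PySem string primitives are defined over List Char; ports work on the char-list side).
def pvOrd : List Char := ['i', 'e', 'm', 'a', 'f', 'd', 'q', 'l', 'c', 'b', 'k', 'j', 't', 'p', 'v', 'h']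

-- _single_letter_sort_key: canonical position, or len(_EXTENSION_CANONICAL_ORDER) = 16
def pv_single_letter_sort_key (ext : String) : Int :=
  let e := PySem.Chars.lower ext.toList
  if PySem.Chars.isIn e pvOrd then PySem.Chars.find pvOrd e else (pvOrd.length : Int)

-- _multi_letter_sort_key: the Python tuple (group, subgroup, ext) as the two comparison
-- components for PySem's tuple-key sort sorted2: the lexicographic pair (group, subgroup)
-- and the lowered text as its char list (Python string comparison is lexicographic on
-- code points, as is List Char's `<`).
def pv_multi_letter_sort_key (ext : String) : (Int ×ₗ Int) × List Char :=
  let e := PySem.Chars.lower ext.toList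
  if PySem.Chars.startswith e ['z'] then
    -- second_letter = ext[1] if len(ext) > 1 else ""   (pyGet? is none exactly when len ≤ 1)
    let second : List Char :=
      match PySem.Chars.pyGet? e 1 with
      | some c => [c]
      | none => []
    let subgroup : Int :=
      if PySem.Chars.isIn second pvOrd then PySem.Chars.find pvOrd second else (pvOrd.length : Int)
    (toLex (0, subgroup), e)
  else if PySem.Chars.startswith e ['s'] then
    (toLex (1, 0), e)
  else
    (toLex (2, 0), e)

def generate_march_string (ext_components : List String) (xlen : Int) : String :=
  let part := ext_components.foldl (fun (acc : List String × List String) ext =>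
    if ext ∈ (["Sm", "S", "U"] : List String) then acc
    else if PySem.Str.len ext = 1 then (acc.1 ++ [ext], acc.2)
    else (acc.1, acc.2 ++ [ext])) ([], [])
  let single_letter := PySem.List.sorted part.1 pv_single_letter_sort_key false
  let multi_letter := PySem.List.sorted2 part.2
    (fun e => (pv_multi_letter_sort_key e).1) (fun e => (pv_multi_letter_sort_key e).2) false
  let ext_str := PySem.Str.join "" single_letter
  let ext_str := if multi_letter ≠ [] then ext_str ++ "_" ++ PySem.Str.join "_" multi_letter else ext_str
  let ext_str := PySem.Str.lower ext_str
  "rv" ++ (if xlen ≠ 0 then PySem.Int.toStr xlen else "${XLEN}") ++ ext_str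

-- ===== PORT B =====
-- _z_subpos: canonical second-letter position of a z-extension, none otherwise
def pv_z_subpos (ext : String) : Option Int :=
  let le := PySem.Chars.lower ext.toList
  if PySem.Chars.startswith le ['z'] then
    let second : List Char :=
      match PySem.Chars.pyGet? le 1 with
      | some c => [c]
      | none => []
    some (if PySem.Chars.isIn second pvOrd then PySem.Chars.find pvOrd second else (pvOrd.length : Int))
  else none

def generate_march_string_alt (ext_components : List String) (xlen : Int) : String :=
  let part := ext_components.foldl (fun (acc : List String × List String) ext =>
    if ext ∈ (["Sm", "S", "U"] : List String) then acc
    else if PySem.Str.len ext = 1 then (acc.1 ++ [ext], acc.2)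
    else (acc.1, acc.2 ++ [ext])) ([], [])
  let single := part.1
  let multi := part.2
  -- single letters: one bucket pass over the canonical alphabet, unknown letters last
  let ordered_single :=
    pvOrd.foldl (fun acc c => acc ++ single.filter (fun e => decide (PySem.Chars.lower e.toList = [c]))) []
      ++ single.filter (fun e => !PySem.Chars.isIn (PySem.Chars.lower e.toList) pvOrd)
  -- multi letters: z-buckets by second-letter position, then s, then the rest
  let ordered_multi :=
    ((PySem.List.pyRange 0 ((pvOrd.length : Int) + 1) 1).foldl (fun acc i =>
        acc ++ PySem.List.sorted (multi.filter (fun e => decide (pv_z_subpos e = some i)))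
          (fun e => PySem.Chars.lower e.toList) false) []
      ++ PySem.List.sorted (multi.filter (fun e =>
          decide (pv_z_subpos e = none) && PySem.Chars.startswith (PySem.Chars.lower e.toList) ['s']))
        (fun e => PySem.Chars.lower e.toList) false)
      ++ PySem.List.sorted (multi.filter (fun e =>
          decide (pv_z_subpos e = none) && !PySem.Chars.startswith (PySem.Chars.lower e.toList) ['s']))
        (fun e => PySem.Chars.lower e.toList) false
  let ext_str := PySem.Str.join "" ordered_single
  let ext_str := if ordered_multi ≠ [] then ext_str ++ "_" ++ PySem.Str.join "_" ordered_multi else ext_str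
  let ext_str := PySem.Str.lower ext_str
  "rv" ++ (if xlen ≠ 0 then PySem.Int.toStr xlen else "${XLEN}") ++ ext_str

-- ===== PRECONDITION & SPEC =====
def Spec_generate_march_string (ext_components : List String) (xlen : Int) (out : String) : Prop := out = generate_march_string_alt ext_components xlen
instance (ext_components : List String) (xlen : Int) (out : String) : Decidable (Spec_generate_march_string ext_components xlen out) := by unfold Spec_generate_march_string; infer_instance

-- ===== CLAIM (what is proved, stated in full; the proofs are below) =====
def Claim_equal_generate_march_string : Prop := ∀ (ext_components : List String) (xlen : Int), Dom_generate_march_string ext_components xlen → Spec_generate_march_string ext_components xlen (generate_march_string ext_components xlen)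

-- ===== LEMMAS AND PROOFS =====

-- insertBy facts (PySem.List.sorted is a stable insertion sort built from insertBy)
theorem pv_insertBy_append_false {α : Type} (bf : α → α → Bool) (x : α) (as bs : List α)
    (h : ∀ a ∈ as, bf x a = false) :
    PySem.List.insertBy bf x (as ++ bs) = as ++ PySem.List.insertBy bf x bs := by
  induction as with
  | nil => simp
  | cons a as ih =>
    have ha : bf x a = false := h a (by simp)
    simp [PySem.List.insertBy, ha, ih (fun y hy => h y (by simp [hy]))]

theorem pv_insertBy_append_true {α : Type} (bf : α → α → Bool) (x : α) (as bs : List α)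
    (h : ∀ b ∈ bs, bf x b = true) :
    PySem.List.insertBy bf x (as ++ bs) = PySem.List.insertBy bf x as ++ bs := by
  induction as with
  | nil =>
    cases bs with
    | nil => simp [PySem.List.insertBy]
    | cons b bs => simp [PySem.List.insertBy, h b (by simp)]
  | cons a as ih =>
    cases ha : bf x a with
    | true => simp [PySem.List.insertBy, ha]
    | false => simp [PySem.List.insertBy, ha, ih]

theorem pv_insertBy_congr {α : Type} (bf bf' : α → α → Bool) (x : α) (ys : List α)
    (h : ∀ y ∈ ys, bf x y = bf' x y) :
    PySem.List.insertBy bf x ys = PySem.List.insertBy bf' x ys := by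
  induction ys with
  | nil => rfl
  | cons y ys ih =>
    have hy : bf x y = bf' x y := h y (by simp)
    cases hb : bf' x y with
    | true => simp [PySem.List.insertBy, hy, hb]
    | false => simp [PySem.List.insertBy, hy, hb, ih (fun z hz => h z (by simp [hz]))]

theorem pv_sorted_snoc {α κ : Type} [LT κ] [DecidableLT κ] (xs : List α) (x : α) (key : α → κ) :
    PySem.List.sorted (xs ++ [x]) key false
      = PySem.List.insertBy (fun a b => decide (key a < key b)) x (PySem.List.sorted xs key false) := by
  rw [PySem.List.sorted_eq_foldl_insertBy, PySem.List.sorted_eq_foldl_insertBy, List.foldl_append]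
  simp

theorem pv_sorted2_snoc {α κ₁ κ₂ : Type} [LT κ₁] [DecidableLT κ₁] [LT κ₂] [DecidableLT κ₂]
    (xs : List α) (x : α) (k1 : α → κ₁) (k2 : α → κ₂) :
    PySem.List.sorted2 (xs ++ [x]) k1 k2 false
      = PySem.List.insertBy
          (fun a b => decide (k1 a < k1 b) || (!decide (k1 b < k1 a) && decide (k2 a < k2 b)))
          x (PySem.List.sorted2 xs k1 k2 false) := by
  simp only [PySem.List.sorted2]
  rw [List.foldl_append]
  simp

theorem pv_sorted_eq_sorted2_const {α : Type} (xs : List α) (key : α → Int) :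
    PySem.List.sorted xs key false = PySem.List.sorted2 xs key (fun _ => (0 : Int)) false := by
  induction xs using List.reverseRecOn with
  | nil => rfl
  | append_singleton xs x ih =>
    rw [pv_sorted_snoc, pv_sorted2_snoc, ih]
    exact pv_insertBy_congr _ _ _ _ (fun y _ => by simp)

-- A stable tuple-key sort is: buckets by the first key (in increasing order of its
-- values), each bucket stably sorted by the second key.
theorem pv_sorted2_bucket {α κ₁ κ₂ : Type} [LT κ₁] [DecidableEq κ₁] [DecidableLT κ₁]
    [LT κ₂] [DecidableLT κ₂]
    (hirr : ∀ u : κ₁, ¬u < u) (hasym : ∀ u v : κ₁, u < v → ¬v < u)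
    (xs : List α) (k1 : α → κ₁) (k2 : α → κ₂) (vs : List κ₁)
    (hvs : vs.Pairwise (· < ·)) (hcov : ∀ x ∈ xs, k1 x ∈ vs) :
    PySem.List.sorted2 xs k1 k2 false
      = vs.flatMap (fun v => PySem.List.sorted (xs.filter (fun x => decide (k1 x = v))) k2 false) := by
  induction xs using List.reverseRecOn with
  | nil => simp [PySem.List.sorted2, PySem.List.sorted, List.flatMap_eq_nil_iff]
  | append_singleton xs x ih =>
    have hcov' : ∀ y ∈ xs, k1 y ∈ vs := fun y hy => hcov y (by simp [hy])
    obtain ⟨vs₁, vs₂, hvseq⟩ := List.append_of_mem (hcov x (by simp))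
    subst hvseq
    rw [List.pairwise_append] at hvs
    obtain ⟨hp1, hp2, h12⟩ := hvs
    rw [List.pairwise_cons] at hp2
    obtain ⟨hxlt, _⟩ := hp2
    have hgt : ∀ u ∈ vs₁, u < k1 x := fun u hu => h12 u hu _ (by simp)
    have hne1 : ∀ u ∈ vs₁, u ≠ k1 x := by
      intro u hu he; exact hirr _ (he ▸ hgt u hu)
    have hne2 : ∀ u ∈ vs₂, u ≠ k1 x := by
      intro u hu he; exact hirr _ (he ▸ hxlt u hu)
    -- old buckets (over xs)
    set F : κ₁ → List α :=
      fun v => PySem.List.sorted (xs.filter (fun y => decide (k1 y = v))) k2 false with hF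
    -- new buckets (over xs ++ [x]) agree with the old ones except at k1 x
    have hbucket : ∀ v : κ₁, v ≠ k1 x →
        (xs ++ [x]).filter (fun y => decide (k1 y = v)) = xs.filter (fun y => decide (k1 y = v)) := by
      intro v hv
      rw [List.filter_append]
      simp [Ne.symm hv]
    have hbucketx : (xs ++ [x]).filter (fun y => decide (k1 y = k1 x))
        = xs.filter (fun y => decide (k1 y = k1 x)) ++ [x] := by
      rw [List.filter_append]; simp
    have hflat1 : vs₁.flatMap
        (fun v => PySem.List.sorted ((xs ++ [x]).filter (fun y => decide (k1 y = v))) k2 false)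
        = vs₁.flatMap F := by
      apply List.flatMap_congr
      intro v hv; rw [hbucket v (hne1 v hv)]
    have hflat2 : vs₂.flatMap
        (fun v => PySem.List.sorted ((xs ++ [x]).filter (fun y => decide (k1 y = v))) k2 false)
        = vs₂.flatMap F := by
      apply List.flatMap_congr
      intro v hv; rw [hbucket v (hne2 v hv)]
    -- the insertion step
    set bf : α → α → Bool :=
      fun a b => decide (k1 a < k1 b) || (!decide (k1 b < k1 a) && decide (k2 a < k2 b)) with hbf
    have hmem : ∀ (v : κ₁) (a : α), a ∈ F v → k1 a = v := by
      intro v a ha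
      rw [hF, PySem.List.mem_sorted, List.mem_filter] at ha
      exact of_decide_eq_true ha.2
    have hfalse : ∀ a ∈ vs₁.flatMap F, bf x a = false := by
      intro a ha
      obtain ⟨v, hv, hav⟩ := List.mem_flatMap.mp ha
      have hk : k1 a = v := hmem v a hav
      have hlt : k1 a < k1 x := by rw [hk]; exact hgt v hv
      have h1 : decide (k1 x < k1 a) = false := decide_eq_false (hasym _ _ hlt)
      have h2 : decide (k1 a < k1 x) = true := decide_eq_true hlt
      rw [hbf]
      simp [h1, h2]
    have htrue : ∀ b ∈ vs₂.flatMap F, bf x b = true := by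
      intro b hb
      obtain ⟨v, hv, hbv⟩ := List.mem_flatMap.mp hb
      have hk : k1 b = v := hmem v b hbv
      have hlt : k1 x < k1 b := by rw [hk]; exact hxlt v hv
      rw [hbf]
      simp [decide_eq_true hlt]
    have hcongr : ∀ y ∈ F (k1 x), bf x y = decide (k2 x < k2 y) := by
      intro y hy
      have hk : k1 y = k1 x := hmem _ y hy
      have h1 : decide (k1 x < k1 y) = false := decide_eq_false (by rw [hk]; exact hirr _)
      have h2 : decide (k1 y < k1 x) = false := decide_eq_false (by rw [hk]; exact hirr _)
      rw [hbf]
      simp [h1, h2]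
    calc PySem.List.sorted2 (xs ++ [x]) k1 k2 false
        = PySem.List.insertBy bf x (PySem.List.sorted2 xs k1 k2 false) := by
          rw [pv_sorted2_snoc]
      _ = PySem.List.insertBy bf x ((vs₁.flatMap F ++ F (k1 x)) ++ vs₂.flatMap F) := by
          rw [ih hcov', List.flatMap_append, List.flatMap_cons, List.append_assoc]
      _ = PySem.List.insertBy bf x (vs₁.flatMap F ++ F (k1 x)) ++ vs₂.flatMap F :=
          pv_insertBy_append_true bf x _ _ htrue
      _ = (vs₁.flatMap F ++ PySem.List.insertBy bf x (F (k1 x))) ++ vs₂.flatMap F := by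
          rw [pv_insertBy_append_false bf x _ _ hfalse]
      _ = (vs₁.flatMap F ++ PySem.List.insertBy (fun a b => decide (k2 a < k2 b)) x (F (k1 x)))
            ++ vs₂.flatMap F := by
          rw [pv_insertBy_congr bf (fun a b => decide (k2 a < k2 b)) x (F (k1 x)) hcongr]
      _ = (vs₁.flatMap F
            ++ PySem.List.sorted (xs.filter (fun y => decide (k1 y = k1 x)) ++ [x]) k2 false)
            ++ vs₂.flatMap F := by
          rw [hF, ← pv_sorted_snoc]
      _ = (vs₁ ++ k1 x :: vs₂).flatMap
            (fun v => PySem.List.sorted ((xs ++ [x]).filter (fun y => decide (k1 y = v))) k2 false) := by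
          rw [List.flatMap_append, List.flatMap_cons, hflat1, hflat2, hbucketx, List.append_assoc]

-- character-level facts about str.find / `in` on single-character needles
theorem pv_find_go (sub t : List Char) (k : Nat) :
    PySem.Chars.find.go sub t k =
      if PySem.Chars.find t sub = -1 then -1 else PySem.Chars.find t sub + k := by
  induction t generalizing k with
  | nil =>
    have hgo : ∀ m : Nat, PySem.Chars.find.go sub [] m = if sub.isEmpty then (m : Int) else -1 :=
      fun m => rfl
    have hfind : PySem.Chars.find [] sub = if sub.isEmpty then (0 : Int) else -1 := hgo 0
    rw [hgo, hfind]
    cases sub.isEmpty <;> simp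
  | cons c t ih =>
    have hgo : ∀ m : Nat, PySem.Chars.find.go sub (c :: t) m
        = if sub.isPrefixOf (c :: t) then (m : Int) else PySem.Chars.find.go sub t (m + 1) :=
      fun m => rfl
    have hfind : PySem.Chars.find (c :: t) sub
        = if sub.isPrefixOf (c :: t) then (0 : Int) else PySem.Chars.find.go sub t 1 := hgo 0
    rw [hgo, hfind, ih, ih]
    have hb := PySem.Chars.neg_one_le_find t sub
    split_ifs
    all_goals push_cast
    all_goals omega

theorem pv_find_cons (sub : List Char) (c : Char) (t : List Char) :
    PySem.Chars.find (c :: t) sub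
      = if sub.isPrefixOf (c :: t) then (0 : Int)
        else (if PySem.Chars.find t sub = -1 then -1 else PySem.Chars.find t sub + 1) := by
  have h1 : PySem.Chars.find (c :: t) sub
      = if sub.isPrefixOf (c :: t) then (0 : Int) else PySem.Chars.find.go sub t 1 := rfl
  rw [h1, pv_find_go sub t 1]
  split_ifs <;> omega

theorem pv_find_singleton (s : List Char) (d : Char) :
    PySem.Chars.find s [d] = if d ∈ s then (s.idxOf d : Int) else -1 := by
  induction s with
  | nil => simp [PySem.Chars.find, PySem.Chars.find.go]
  | cons c t ih =>
    rw [pv_find_cons, ih]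
    by_cases hdc : d = c
    · simp [List.isPrefixOf, hdc]
    · have hprefix : ([d].isPrefixOf (c :: t)) = false := by simp [List.isPrefixOf, hdc]
      have hne : ¬c = d := fun h => hdc h.symm
      by_cases hdt : d ∈ t
      · have h0 : (0 : Int) ≤ (t.idxOf d : Int) := Int.natCast_nonneg _
        have hcd : (c == d) = false := by simp [hne]
        simp only [hprefix, Bool.false_eq_true, if_false, hdt, if_true, List.mem_cons, hdc,
          false_or, List.idxOf_cons, hcd, cond_false]
        split_ifs
        all_goals push_cast
        all_goals first | assumption | omega
      · have hmem : ¬d ∈ c :: t := by simp [hdc, hdt]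
        simp [hprefix, hdt, hmem]

theorem pv_isIn_singleton (s : List Char) (d : Char) :
    PySem.Chars.isIn [d] s = decide (d ∈ s) := by
  simp only [PySem.Chars.isIn, pv_find_singleton]
  by_cases h : d ∈ s
  · have : (0 : Int) ≤ (s.idxOf d : Int) := Int.natCast_nonneg _
    simp [h, bne]
  · simp [h]

-- the single-letter key on a one-character string
theorem pv_single_key_eq (e : String) (d : Char) (hd : e.toList = [d]) :
    pv_single_letter_sort_key e =
      if PySem.Chars.lowerChar d ∈ pvOrd then (pvOrd.idxOf (PySem.Chars.lowerChar d) : Int) else 16 := by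
  simp only [pv_single_letter_sort_key, hd, PySem.Chars.lower, List.map]
  rw [pv_isIn_singleton, pv_find_singleton]
  simp only [decide_eq_true_eq]
  by_cases h : PySem.Chars.lowerChar d ∈ pvOrd
  · rw [if_pos h, if_pos h, if_pos h]
  · rw [if_neg h, if_neg h]
    decide

-- the single-letter comparison sort equals B's bucket pass
theorem pv_single_eq (xs : List String) (hlen : ∀ e ∈ xs, e.toList.length = 1) :
    PySem.List.sorted xs pv_single_letter_sort_key false
      = pvOrd.foldl (fun acc c => acc ++ xs.filter (fun e => decide (PySem.Chars.lower e.toList = [c]))) []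
        ++ xs.filter (fun e => !PySem.Chars.isIn (PySem.Chars.lower e.toList) pvOrd) := by
  have hsingle : ∀ e ∈ xs, ∃ d, e.toList = [d] := fun e he => List.length_eq_one_iff.mp (hlen e he)
  have hconst : ∀ l : List String, PySem.List.sorted l (fun _ => (0 : Int)) false = l := by
    intro l
    apply PySem.List.sorted_eq_self_of_pairwise
    induction l with
    | nil => exact .nil
    | cons a t ih => exact .cons (fun b _ => le_refl 0) ih
  rw [pv_sorted_eq_sorted2_const xs pv_single_letter_sort_key]
  rw [pv_sorted2_bucket (fun u => lt_irrefl u) (fun u v h => lt_asymm h)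
      xs pv_single_letter_sort_key (fun _ => (0 : Int))
      (pvOrd.map (fun c => (pvOrd.idxOf c : Int)) ++ [16])
      (by decide)
      (by
        intro e he
        obtain ⟨d, hd⟩ := hsingle e he
        rw [pv_single_key_eq e d hd]
        by_cases h : PySem.Chars.lowerChar d ∈ pvOrd
        · rw [if_pos h]
          exact List.mem_append_left _ (List.mem_map_of_mem h)
        · rw [if_neg h]; simp)]
  simp only [hconst]
  rw [List.flatMap_append, List.flatMap_map, PySem.List.foldl_append_eq_flatMap]
  simp only [List.nil_append, List.flatMap_cons, List.flatMap_nil, List.append_nil]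
  congr 1
  · apply List.flatMap_congr
    intro c hc
    apply List.filter_congr
    intro e he
    obtain ⟨d, hd⟩ := hsingle e he
    rw [pv_single_key_eq e d hd, hd]
    simp only [PySem.Chars.lower, List.map]
    apply decide_eq_decide.mpr
    constructor
    · intro h
      by_cases hm : PySem.Chars.lowerChar d ∈ pvOrd
      · rw [if_pos hm] at h
        have hidx : pvOrd.idxOf (PySem.Chars.lowerChar d) = pvOrd.idxOf c := by exact_mod_cast h
        have : PySem.Chars.lowerChar d = c := by
          have h1 := List.getElem_idxOf (List.idxOf_lt_length_of_mem hm)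
          have h2 := List.getElem_idxOf (List.idxOf_lt_length_of_mem hc)
          rw [← h1, ← h2]
          simp [hidx]
        rw [this]
      · rw [if_neg hm] at h
        have := List.idxOf_lt_length_of_mem hc
        have hlen16 : pvOrd.length = 16 := by decide
        omega
    · intro h
      have hc' : PySem.Chars.lowerChar d = c := by
        injection h
      rw [if_pos (hc' ▸ hc), hc']
  · apply List.filter_congr
    intro e he
    obtain ⟨d, hd⟩ := hsingle e he
    rw [pv_single_key_eq e d hd, hd]
    simp only [PySem.Chars.lower, List.map, pv_isIn_singleton]
    by_cases hm : PySem.Chars.lowerChar d ∈ pvOrd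
    · have hlt := List.idxOf_lt_length_of_mem hm
      have hlen16 : pvOrd.length = 16 := by decide
      rw [if_pos hm]
      simp only [hm, decide_true, Bool.not_true]
      apply decide_eq_false
      intro hcontra
      have h16 : pvOrd.idxOf (PySem.Chars.lowerChar d) = 16 := by exact_mod_cast hcontra
      omega
    · rw [if_neg hm]
      simp [hm]

-- proof-side view of the multi-letter key as a lexicographic (first, second) pair
def pvK1 (ext : String) : Int ×ₗ Int :=
  let e := PySem.Chars.lower ext.toList
  if PySem.Chars.startswith e ['z'] then
    let second : List Char :=
      match PySem.Chars.pyGet? e 1 with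
      | some c => [c]
      | none => []
    toLex (0, if PySem.Chars.isIn second pvOrd then PySem.Chars.find pvOrd second else (pvOrd.length : Int))
  else if PySem.Chars.startswith e ['s'] then toLex (1, 0) else toLex (2, 0)

theorem pv_mkey1 : (fun e => (pv_multi_letter_sort_key e).1) = pvK1 := by
  funext e
  simp only [pv_multi_letter_sort_key, pvK1]
  split_ifs <;> rfl

theorem pv_mkey2 : (fun e => (pv_multi_letter_sort_key e).2)
    = fun e => PySem.Chars.lower e.toList := by
  funext e
  simp only [pv_multi_letter_sort_key]
  split_ifs <;> rfl

-- the 19 possible first-key values, in increasing lexicographic order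
def pvVs : List (Int ×ₗ Int) :=
  [toLex (0, 0), toLex (0, 1), toLex (0, 2), toLex (0, 3), toLex (0, 4), toLex (0, 5),
   toLex (0, 6), toLex (0, 7), toLex (0, 8), toLex (0, 9), toLex (0, 10), toLex (0, 11),
   toLex (0, 12), toLex (0, 13), toLex (0, 14), toLex (0, 15), toLex (0, 16),
   toLex (1, 0), toLex (2, 0)]

theorem pv_bucket_z (xs : List String) (i : Int) :
    xs.filter (fun e => decide (pvK1 e = toLex (0, i)))
      = xs.filter (fun e => decide (pv_z_subpos e = some i)) := by
  apply List.filter_congr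
  intro e _
  apply decide_eq_decide.mpr
  simp only [pvK1, pv_z_subpos]
  split_ifs <;> simp [Prod.mk.injEq]

theorem pv_bucket_s (xs : List String) :
    xs.filter (fun e => decide (pvK1 e = toLex (1, 0)))
      = xs.filter (fun e =>
          decide (pv_z_subpos e = none) && PySem.Chars.startswith (PySem.Chars.lower e.toList) ['s']) := by
  apply List.filter_congr
  intro e _
  simp only [pvK1, pv_z_subpos]
  split_ifs <;> simp_all [Prod.mk.injEq]

theorem pv_bucket_other (xs : List String) :
    xs.filter (fun e => decide (pvK1 e = toLex (2, 0)))
      = xs.filter (fun e =>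
          decide (pv_z_subpos e = none) && !PySem.Chars.startswith (PySem.Chars.lower e.toList) ['s']) := by
  apply List.filter_congr
  intro e _
  simp only [pvK1, pv_z_subpos]
  split_ifs <;> simp_all [Prod.mk.injEq]

theorem pv_multi_eq (xs : List String) :
    PySem.List.sorted2 xs
      (fun e => (pv_multi_letter_sort_key e).1) (fun e => (pv_multi_letter_sort_key e).2) false
      = ((PySem.List.pyRange 0 ((pvOrd.length : Int) + 1) 1).foldl (fun acc i =>
            acc ++ PySem.List.sorted (xs.filter (fun e => decide (pv_z_subpos e = some i)))
              (fun e => PySem.Chars.lower e.toList) false) []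
          ++ PySem.List.sorted (xs.filter (fun e =>
              decide (pv_z_subpos e = none) && PySem.Chars.startswith (PySem.Chars.lower e.toList) ['s']))
            (fun e => PySem.Chars.lower e.toList) false)
          ++ PySem.List.sorted (xs.filter (fun e =>
              decide (pv_z_subpos e = none) && !PySem.Chars.startswith (PySem.Chars.lower e.toList) ['s']))
            (fun e => PySem.Chars.lower e.toList) false := by
  have hirr : ∀ u : Int ×ₗ Int, ¬u < u := by
    intro u h
    rcases Prod.Lex.lt_iff.mp h with h' | ⟨_, h'⟩ <;> exact lt_irrefl _ h'
  have hasym : ∀ u v : Int ×ₗ Int, u < v → ¬v < u := by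
    intro u v h h'
    rcases Prod.Lex.lt_iff.mp h with h1 | ⟨h1, h2⟩ <;>
      rcases Prod.Lex.lt_iff.mp h' with h1' | ⟨h1', h2'⟩ <;> omega
  have hcov : ∀ e ∈ xs, pvK1 e ∈ pvVs := by
    intro e _
    by_cases hz : PySem.Chars.startswith (PySem.Chars.lower e.toList) ['z'] = true
    · simp only [pvK1, hz, if_true]
      by_cases hin : PySem.Chars.isIn
          (match PySem.Chars.pyGet? (PySem.Chars.lower e.toList) 1 with
           | some c => [c]
           | none => []) pvOrd = true
      · simp only [hin, if_true]
        have h1 := PySem.Chars.neg_one_le_find pvOrd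
          (match PySem.Chars.pyGet? (PySem.Chars.lower e.toList) 1 with
           | some c => [c]
           | none => [])
        have h2 := PySem.Chars.find_le_length pvOrd
          (match PySem.Chars.pyGet? (PySem.Chars.lower e.toList) 1 with
           | some c => [c]
           | none => [])
        have h3 : PySem.Chars.find pvOrd
            (match PySem.Chars.pyGet? (PySem.Chars.lower e.toList) 1 with
             | some c => [c]
             | none => []) ≠ -1 := by
          simpa [PySem.Chars.isIn] using hin
        have h4 : ((pvOrd.length : Nat) : Int) = 16 := by decide
        simp only [pvVs, List.mem_cons, toLex_inj, Prod.mk.injEq, List.not_mem_nil, or_false,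
          true_and]
        omega
      · simp only [Bool.not_eq_true] at hin
        simp only [hin, Bool.false_eq_true, if_false]
        decide
    · simp only [Bool.not_eq_true] at hz
      simp only [pvK1, hz, Bool.false_eq_true, if_false]
      by_cases hsx : PySem.Chars.startswith (PySem.Chars.lower e.toList) ['s'] = true
      · simp only [hsx, if_true]
        decide
      · simp only [Bool.not_eq_true] at hsx
        simp only [hsx, Bool.false_eq_true, if_false]
        decide
  rw [pv_mkey1, pv_mkey2,
    pv_sorted2_bucket hirr hasym xs pvK1 (fun e => PySem.Chars.lower e.toList) pvVs
      (by decide) hcov]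
  have hsplit : pvVs
      = (([0, 1, 2, 3, 4, 5, 6, 7, 8, 9, 10, 11, 12, 13, 14, 15, 16] : List Int).map
          (fun i => (toLex (0, i) : Int ×ₗ Int)))
        ++ [toLex (1, 0), toLex (2, 0)] := by decide
  have hrange : PySem.List.pyRange 0 ((pvOrd.length : Int) + 1) 1
      = ([0, 1, 2, 3, 4, 5, 6, 7, 8, 9, 10, 11, 12, 13, 14, 15, 16] : List Int) := by decide
  rw [hsplit, List.flatMap_append]
  have h1 : (([0, 1, 2, 3, 4, 5, 6, 7, 8, 9, 10, 11, 12, 13, 14, 15, 16] : List Int).map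
        (fun i => (toLex (0, i) : Int ×ₗ Int))).flatMap
        (fun v => PySem.List.sorted (xs.filter (fun x => decide (pvK1 x = v)))
          (fun e => PySem.Chars.lower e.toList) false)
      = ([0, 1, 2, 3, 4, 5, 6, 7, 8, 9, 10, 11, 12, 13, 14, 15, 16] : List Int).flatMap
        (fun i => PySem.List.sorted (xs.filter (fun e => decide (pv_z_subpos e = some i)))
          (fun e => PySem.Chars.lower e.toList) false) := by
    rw [List.flatMap_map]
    apply List.flatMap_congr
    intro i _
    rw [pv_bucket_z]
  have h2 : ([toLex (1, 0), toLex (2, 0)] : List (Int ×ₗ Int)).flatMap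
        (fun v => PySem.List.sorted (xs.filter (fun x => decide (pvK1 x = v)))
          (fun e => PySem.Chars.lower e.toList) false)
      = PySem.List.sorted (xs.filter (fun e =>
            decide (pv_z_subpos e = none) && PySem.Chars.startswith (PySem.Chars.lower e.toList) ['s']))
          (fun e => PySem.Chars.lower e.toList) false
        ++ PySem.List.sorted (xs.filter (fun e =>
            decide (pv_z_subpos e = none) && !PySem.Chars.startswith (PySem.Chars.lower e.toList) ['s']))
          (fun e => PySem.Chars.lower e.toList) false := by
    rw [List.flatMap_cons, List.flatMap_cons, List.flatMap_nil, List.append_nil,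
      pv_bucket_s, pv_bucket_other]
  rw [h1, h2, hrange, PySem.List.foldl_append_eq_flatMap, List.nil_append, List.append_assoc]

-- the shared partition loop, characterised by two filters
theorem pv_partition (l : List String) (acc : List String × List String) :
    l.foldl (fun (acc : List String × List String) ext =>
        if ext ∈ (["Sm", "S", "U"] : List String) then acc
        else if PySem.Str.len ext = 1 then (acc.1 ++ [ext], acc.2)
        else (acc.1, acc.2 ++ [ext])) acc
      = (acc.1 ++ l.filter (fun e =>
            !decide (e ∈ (["Sm", "S", "U"] : List String)) && decide (PySem.Str.len e = 1)),
         acc.2 ++ l.filter (fun e =>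
            !decide (e ∈ (["Sm", "S", "U"] : List String)) && !decide (PySem.Str.len e = 1))) := by
  induction l generalizing acc with
  | nil => simp
  | cons e l ih =>
    simp only [List.foldl_cons]
    by_cases h1 : e ∈ (["Sm", "S", "U"] : List String)
    · rw [if_pos h1, ih]
      have h1' : e = "Sm" ∨ e = "S" ∨ e = "U" := by simpa using h1
      rcases h1' with h | h | h <;> subst h <;> simp
    · rw [if_neg h1]
      have h1' : ¬e = "Sm" ∧ ¬e = "S" ∧ ¬e = "U" := by simpa [not_or] using h1
      by_cases h2 : PySem.Str.len e = 1
      · rw [if_pos h2, ih]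
        have h2' : e.length = 1 := by simpa using h2
        simp [h1'.1, h1'.2.1, h1'.2.2, h2']
      · rw [if_neg h2, ih]
        have h2' : ¬e.length = 1 := by simpa using h2
        simp [h1'.1, h1'.2.1, h1'.2.2, h2']

theorem pv_main (ext_components : List String) (xlen : Int) :
    generate_march_string ext_components xlen = generate_march_string_alt ext_components xlen := by
  simp only [generate_march_string, generate_march_string_alt]
  set p := ext_components.foldl (fun (acc : List String × List String) ext =>
    if ext ∈ (["Sm", "S", "U"] : List String) then acc
    else if PySem.Str.len ext = 1 then (acc.1 ++ [ext], acc.2)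
    else (acc.1, acc.2 ++ [ext])) ([], []) with hp
  have hlen : ∀ e ∈ p.1, e.toList.length = 1 := by
    intro e he
    rw [hp, pv_partition, List.nil_append] at he
    have h : e ∈ ext_components ∧ (¬e = "Sm" ∧ ¬e = "S" ∧ ¬e = "U") ∧ e.length = 1 := by
      simpa using he
    rw [String.length_toList]
    exact h.2.2
  rw [pv_single_eq p.1 hlen, pv_multi_eq p.2]

-- ===== VERDICT (by name: the statement is the Claim_ definition above) =====
theorem generate_march_string_spec : Claim_equal_generate_march_string := by
  intro ext_components xlen _
  exact pv_main ext_components xlen
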